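-- pv_equiv track=rewrite | github.com/Sherwen2333/CSE101 | Hw/hw4/homework4_driver.py | check_dictionary
-- ===== SOURCE A (Python) =====
-- def check_dictionary(expected, actual):
--     if len(expected) != len(actual):
--         return False
--
--     for key in expected:
--         if key in actual:
--             if not isinstance(actual[key], type(expected[key])):
--                 return False
--             if actual[key] != expected[key]:
--                 return False
--         else:
--             return False
--     return True
-- ===== SOURCE B (Python) =====
-- def check_dictionary(expected, actual):
--     return sorted(expected.items()) == sorted(actual.items())
-- ===== Notes on version B (the rewrite author's own statement) =====
-- stated objective: alternative
-- what changed: B replaces A's length-check-plus-per-key membership/value loop by a sort-then-compare: it sorts both dicts' item lists and returns whether the sorted lists are equal (tuple equality subsumes the key/value checks; the isinstance test is vacuous for the int values the function handles).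
import Mathlib
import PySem

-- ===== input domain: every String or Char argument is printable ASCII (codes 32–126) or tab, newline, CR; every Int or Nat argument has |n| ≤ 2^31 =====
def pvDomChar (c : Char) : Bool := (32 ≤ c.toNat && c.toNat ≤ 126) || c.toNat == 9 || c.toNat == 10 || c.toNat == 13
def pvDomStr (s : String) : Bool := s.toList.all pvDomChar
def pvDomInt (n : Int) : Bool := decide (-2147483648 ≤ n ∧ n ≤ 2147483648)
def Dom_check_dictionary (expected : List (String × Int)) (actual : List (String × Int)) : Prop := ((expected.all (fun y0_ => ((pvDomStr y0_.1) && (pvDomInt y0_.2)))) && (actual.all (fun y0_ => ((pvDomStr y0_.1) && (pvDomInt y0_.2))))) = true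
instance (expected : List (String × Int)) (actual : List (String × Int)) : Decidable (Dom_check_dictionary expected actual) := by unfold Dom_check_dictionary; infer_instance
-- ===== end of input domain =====

-- B replaces A's interleaved length-check-plus-per-key membership/value loop by sort-then-compare
-- (sorted(expected.items()) == sorted(actual.items())); objective: alternative, same practical cost.
-- Both dict arguments are association lists built into PySem.Dict (Python dict semantics: duplicate
-- keys overwrite in place). Python's isinstance(actual[key], type(expected[key])) is always True for
-- two int values (the declared value type), so it has no computational counterpart in port A.

-- ===== PORT A =====
-- the 'for key in expected' loop with its early returns
def checkLoopA (da de : PySem.Dict String Int) : List String → Bool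
  | [] => true
  | k :: ks =>
    if da.contains k then
      -- isinstance check: vacuously true for Int values
      if da.getD k 0 ≠ de.getD k 0 then false
      else checkLoopA da de ks
    else false

def check_dictionary (expected : List (String × Int)) (actual : List (String × Int)) : Bool :=
  let de := PySem.Dict.ofList expected
  let da := PySem.Dict.ofList actual
  if de.size ≠ da.size then false
  else checkLoopA da de de.keys

-- ===== PORT B =====
-- sorted(d.items()) sorts (str, int) tuples lexicographically: PySem.List.sorted2 on the two components
def check_dictionary_alt (expected : List (String × Int)) (actual : List (String × Int)) : Bool :=
  let de := PySem.Dict.ofList expected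
  let da := PySem.Dict.ofList actual
  PySem.List.sorted2 de.items (fun p => p.1) (fun p => p.2)
    == PySem.List.sorted2 da.items (fun p => p.1) (fun p => p.2)

-- ===== PRECONDITION & SPEC =====
def Spec_check_dictionary (expected : List (String × Int)) (actual : List (String × Int)) (out : Bool) : Prop := out = check_dictionary_alt expected actual
instance (expected : List (String × Int)) (actual : List (String × Int)) (out : Bool) : Decidable (Spec_check_dictionary expected actual out) := by unfold Spec_check_dictionary; infer_instance

-- ===== CLAIM (what is proved, stated in full; the proofs are below) =====
def Claim_equal_check_dictionary : Prop := ∀ (expected : List (String × Int)) (actual : List (String × Int)), Dom_check_dictionary expected actual → Spec_check_dictionary expected actual (check_dictionary expected actual)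

-- ===== LEMMAS AND PROOFS =====

theorem insertBy_congr {α : Type} (f g : α → α → Bool) (x : α) (ys : List α)
    (h : ∀ b ∈ ys, f x b = g x b) :
    PySem.List.insertBy f x ys = PySem.List.insertBy g x ys := by
  induction ys with
  | nil => rfl
  | cons y ys ih =>
    simp only [PySem.List.insertBy]
    rw [h y (by simp)]
    by_cases hg : g x y = true
    · simp [hg]
    · simp only [hg]
      rw [ih (fun b hb => h b (by simp [hb]))]

theorem foldl_insertBy_congr {α : Type} (f g : α → α → Bool) (l : List α)
    (hfg : ∀ a ∈ l, ∀ b ∈ l, f a b = g a b) :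
    ∀ (xs acc : List α), (∀ a ∈ xs, a ∈ l) → (∀ b ∈ acc, b ∈ l) →
      xs.foldl (fun acc x => PySem.List.insertBy f x acc) acc
        = xs.foldl (fun acc x => PySem.List.insertBy g x acc) acc := by
  intro xs
  induction xs with
  | nil => intro acc _ _; rfl
  | cons x xs ih =>
    intro acc hxs hacc
    simp only [List.foldl_cons]
    rw [insertBy_congr f g x acc (fun b hb => hfg x (hxs x (by simp)) b (hacc b hb))]
    refine ih _ (fun a ha => hxs a (by simp [ha])) (fun b hb => ?_)
    rcases (PySem.List.mem_insertBy g x b acc).mp hb with h | h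
    · exact h ▸ hxs x (by simp)
    · exact hacc b h

-- with pairwise-distinct first components, the lexicographic tuple sort degenerates to a sort by key
theorem sorted2_eq_sorted_fst (xs : List (String × Int)) (h : (xs.map Prod.fst).Nodup) :
    PySem.List.sorted2 xs (fun p => p.1) (fun p => p.2)
      = PySem.List.sorted xs (fun p => p.1) := by
  show xs.foldl (fun acc x => PySem.List.insertBy
      (fun a b => decide (a.1 < b.1) || (!decide (b.1 < a.1) && decide (a.2 < b.2))) x acc) []
    = xs.foldl (fun acc x => PySem.List.insertBy (fun a b => decide (a.1 < b.1)) x acc) []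
  refine foldl_insertBy_congr _ _ xs ?_ xs [] (fun a ha => ha) (by simp)
  intro a ha b hb
  by_cases hab : a = b
  · subst hab; simp
  · have hne : a.1 ≠ b.1 := fun e => hab (List.inj_on_of_nodup_map h ha hb e)
    rcases lt_trichotomy a.1 b.1 with h1 | h1 | h1
    · simp [h1]
    · exact absurd h1 hne
    · simp [h1, not_lt_of_gt h1]

theorem sorted_fst_pairwise_lt (xs : List (String × Int)) (h : (xs.map Prod.fst).Nodup) :
    (PySem.List.sorted xs (fun p => p.1)).Pairwise (fun a b => a.1 < b.1) := by
  have hle : (PySem.List.sorted xs (fun p => p.1)).Pairwise (fun a b => a.1 ≤ b.1) :=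
    PySem.List.sorted_pairwise xs (fun p => p.1)
  have hnd : ((PySem.List.sorted xs (fun p => p.1)).map Prod.fst).Nodup :=
    h.perm ((PySem.List.sorted_perm xs (fun p => p.1) false).map Prod.fst).symm
  have hne : (PySem.List.sorted xs (fun p => p.1)).Pairwise (fun a b => a.1 ≠ b.1) :=
    (List.pairwise_map).mp hnd
  exact (hle.and hne).imp (fun hp => lt_of_le_of_ne hp.1 hp.2)

theorem checkLoopA_eq_all (da de : PySem.Dict String Int) (ks : List String) :
    checkLoopA da de ks = ks.all (fun k => da.contains k && (da.getD k 0 == de.getD k 0)) := by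
  induction ks with
  | nil => rfl
  | cons k ks ih =>
    simp only [checkLoopA, List.all_cons, ih]
    by_cases h1 : da.contains k <;> by_cases h2 : da.getD k 0 = de.getD k 0 <;>
      simp [h1, h2]

theorem check_dictionary_true_iff (expected actual : List (String × Int)) :
    check_dictionary expected actual = true ↔
      ((PySem.Dict.ofList expected).keys.length = (PySem.Dict.ofList actual).keys.length ∧
       ∀ k ∈ (PySem.Dict.ofList expected).keys,
         k ∈ (PySem.Dict.ofList actual).keys ∧
         (PySem.Dict.ofList actual).getD k 0 = (PySem.Dict.ofList expected).getD k 0) := by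
  simp only [check_dictionary, checkLoopA_eq_all, PySem.Dict.size, PySem.Dict.keys]
  by_cases h : ((PySem.Dict.ofList expected).items.map Prod.fst).length =
               ((PySem.Dict.ofList actual).items.map Prod.fst).length
  · simp only [List.length_map] at h ⊢
    simp [h, List.all_eq_true, PySem.Dict.contains_iff_mem_keys, PySem.Dict.keys, and_comm]
  · simp only [List.length_map] at h ⊢
    simp [h]

-- A returns True exactly when the two dicts hold the same key-value pairs
theorem check_dictionary_true_iff_perm (expected actual : List (String × Int)) :
    check_dictionary expected actual = true ↔
      (PySem.Dict.ofList expected).items.Perm (PySem.Dict.ofList actual).items := by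
  rw [check_dictionary_true_iff]
  set de := PySem.Dict.ofList expected with hde
  set da := PySem.Dict.ofList actual with hda
  have hnde : de.keys.Nodup := PySem.Dict.nodup_keys_ofList expected
  have hnda : da.keys.Nodup := PySem.Dict.nodup_keys_ofList actual
  constructor
  · rintro ⟨hlen, hall⟩
    have hsub : de.keys ⊆ da.keys := fun k hk => (hall k hk).1
    have hperm : de.keys.Perm da.keys :=
      (List.subperm_of_subset hnde hsub).perm_of_length_le (le_of_eq hlen.symm)
    rw [PySem.Dict.items_eq_map_keys de hnde 0, PySem.Dict.items_eq_map_keys da hnda 0]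
    have h1 : (de.keys.map (fun k => (k, de.getD k 0))).Perm
        (da.keys.map (fun k => (k, de.getD k 0))) := hperm.map _
    have h2 : da.keys.map (fun k => (k, de.getD k 0))
        = da.keys.map (fun k => (k, da.getD k 0)) := by
      refine List.map_congr_left (fun k hk => ?_)
      have hk' : k ∈ de.keys := hperm.mem_iff.mpr hk
      rw [(hall k hk').2]
    rw [h2] at h1; exact h1
  · intro hperm
    have hkeys : de.keys.Perm da.keys := by
      have := hperm.map Prod.fst
      simpa [PySem.Dict.keys] using this
    refine ⟨hkeys.length_eq, fun k hk => ⟨hkeys.mem_iff.mp hk, ?_⟩⟩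
    have hmem : (k, de.getD k 0) ∈ de.items := by
      rw [PySem.Dict.items_eq_map_keys de hnde 0]
      exact List.mem_map.mpr ⟨k, hk, rfl⟩
    have hmem' : (k, de.getD k 0) ∈ da.items := hperm.mem_iff.mp hmem
    exact PySem.Dict.getD_of_mem_items da hmem' hnda 0

theorem check_dictionary_alt_true_iff_perm (expected actual : List (String × Int)) :
    check_dictionary_alt expected actual = true ↔
      (PySem.Dict.ofList expected).items.Perm (PySem.Dict.ofList actual).items := by
  set de := PySem.Dict.ofList expected with hde
  set da := PySem.Dict.ofList actual with hda
  have hnde : (de.items.map Prod.fst).Nodup := by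
    have := PySem.Dict.nodup_keys_ofList expected
    simpa [PySem.Dict.keys] using this
  have hnda : (da.items.map Prod.fst).Nodup := by
    have := PySem.Dict.nodup_keys_ofList actual
    simpa [PySem.Dict.keys] using this
  show (PySem.List.sorted2 de.items (fun p => p.1) (fun p => p.2)
    == PySem.List.sorted2 da.items (fun p => p.1) (fun p => p.2)) = true ↔ _
  rw [beq_iff_eq, sorted2_eq_sorted_fst de.items hnde, sorted2_eq_sorted_fst da.items hnda]
  constructor
  · intro heq
    exact ((PySem.List.sorted_perm de.items (fun p => p.1) false).symm.trans
      (heq ▸ PySem.List.sorted_perm da.items (fun p => p.1) false))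
  · intro hperm
    exact PySem.List.sorted_eq_of_perm_of_pairwise_lt de.items
      (PySem.List.sorted da.items (fun p => p.1)) (fun p => p.1)
      ((PySem.List.sorted_perm da.items (fun p => p.1) false).trans hperm.symm)
      (sorted_fst_pairwise_lt da.items hnda)

-- ===== VERDICT (by name: the statement is the Claim_ definition above) =====
theorem check_dictionary_spec : Claim_equal_check_dictionary := by
  unfold Claim_equal_check_dictionary
  intro expected actual _
  unfold Spec_check_dictionary
  rw [Bool.eq_iff_iff, check_dictionary_true_iff_perm, check_dictionary_alt_true_iff_perm]
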